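-- pv_equiv track=rewrite | github.com/mskozlova/advent_of_code | 2023/day05/day5_pt2.py | intersect_segments
-- ===== SOURCE A (Python) =====
-- def intersect_segments(segment, rule_segments):
--     rule_points = []
--     for rule_start, rule_length in rule_segments:
--         rule_points.append(rule_start)
--         rule_points.append(rule_start + rule_length)
--
--     rule_points.append(segment[0])
--     rule_points.append(segment[0] + segment[1])
--
--     rule_points = sorted(list(set(rule_points)))
--
--     result_segments = []
--     current_point = segment[0]
--     segment_end = segment[0] + segment[1]
--     for rule_point in rule_points:
--         if rule_point > segment_end:
--             break
--         if rule_point > current_point and rule_point <= segment_end: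
--             result_segments.append((current_point, rule_point - current_point))
--             current_point = rule_point
--
--     assert segment[1] == sum(
--         l for _, l in result_segments
--     ), f"segment: {segment},  rule_segments: {rule_segments}, result_segments: {result_segments}"
--
--     return result_segments
-- ===== SOURCE B (Python) =====
-- def _split(pieces, point):
--     return [piece
--             for s, l in pieces
--             for piece in (((s, point - s), (point, s + l - point)) if s < point < s + l else ((s, l),))]
--
--
-- def intersect_segments(segment, rule_segments):
--     start, length = segment
--     pieces = [(start, length)] if length > 0 else []
--     for rule_start, rule_length in rule_segments:
--         pieces = _split(pieces, rule_start)
--         pieces = _split(pieces, rule_start + rule_length)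
--     return pieces
-- ===== Notes on version B (the rewrite author's own statement) =====
-- stated objective: alternative
-- what changed: B never collects or sorts cut points: it starts from the whole segment as a single piece and successively refines the piece list, splitting every piece in place at each rule's two endpoints, so A's global sorted-point list and its current_point/break scan disappear. Pre_ excludes segments with negative length, on which A's final assert raises AssertionError.
import Mathlib
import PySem

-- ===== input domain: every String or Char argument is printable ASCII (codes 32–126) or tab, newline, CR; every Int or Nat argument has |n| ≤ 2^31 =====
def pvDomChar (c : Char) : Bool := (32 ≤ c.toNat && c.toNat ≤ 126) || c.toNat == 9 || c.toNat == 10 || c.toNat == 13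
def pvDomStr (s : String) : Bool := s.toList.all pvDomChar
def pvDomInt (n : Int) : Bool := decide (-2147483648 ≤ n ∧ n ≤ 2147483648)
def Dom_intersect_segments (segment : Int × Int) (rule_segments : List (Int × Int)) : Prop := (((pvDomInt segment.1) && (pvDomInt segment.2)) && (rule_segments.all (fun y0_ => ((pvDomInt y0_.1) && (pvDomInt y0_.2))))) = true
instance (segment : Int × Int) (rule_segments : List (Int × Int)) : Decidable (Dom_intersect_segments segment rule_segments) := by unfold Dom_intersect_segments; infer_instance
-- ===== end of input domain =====

-- B replaces A's sort-all-cut-points-then-scan by successive refinement: it starts from the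
-- whole segment as one piece and splits the piece list in place at each rule's two endpoints
-- (objective: alternative; no sorting, no current_point accumulator).

-- ===== PORT A =====
-- the 'for rule_point in rule_points' loop with its break and the running current_point
def pvLoopA : List Int → Int → Int → List (Int × Int) → List (Int × Int)
  | [], _, _, acc => acc
  | p :: rest, cur, segEnd, acc =>
    if p > segEnd then acc          -- break
    else if p > cur ∧ p ≤ segEnd then pvLoopA rest p segEnd (acc ++ [(cur, p - cur)])
    else pvLoopA rest cur segEnd acc

def intersect_segments (segment : Int × Int) (rule_segments : List (Int × Int)) : List (Int × Int) :=
  let rule_points := rule_segments.foldl (fun acc r => (acc ++ [r.1]) ++ [r.1 + r.2]) []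
  let rule_points := (rule_points ++ [segment.1]) ++ [segment.1 + segment.2]
  let rule_points := PySem.List.sorted (PySem.Set.ofList rule_points) (fun x => x) false
  let segment_end := segment.1 + segment.2
  -- the final assert raises AssertionError exactly when segment.2 < 0; those inputs are excluded by Pre_
  pvLoopA rule_points segment.1 segment_end []

-- ===== PORT B =====
-- _split: one comprehension pass over the pieces, splitting each piece that strictly contains point
def pvSplit (pieces : List (Int × Int)) (point : Int) : List (Int × Int) :=
  pieces.flatMap (fun sl =>
    if sl.1 < point ∧ point < sl.1 + sl.2 then
      [(sl.1, point - sl.1), (point, sl.1 + sl.2 - point)]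
    else [(sl.1, sl.2)])

def intersect_segments_alt (segment : Int × Int) (rule_segments : List (Int × Int)) : List (Int × Int) :=
  let start := segment.1
  let length := segment.2
  let pieces := if length > 0 then [(start, length)] else []
  rule_segments.foldl (fun pcs r => pvSplit (pvSplit pcs r.1) (r.1 + r.2)) pieces

-- ===== PRECONDITION & SPEC =====
-- Pre_ excludes exactly segment.2 < 0: there A's final assert fails (result covers length 0 ≠ segment.2)
-- and A raises AssertionError.
def Pre_intersect_segments (segment : Int × Int) (rule_segments : List (Int × Int)) : Prop :=
  0 ≤ segment.2
instance (segment : Int × Int) (rule_segments : List (Int × Int)) : Decidable (Pre_intersect_segments segment rule_segments) := by unfold Pre_intersect_segments; infer_instance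
def pvWitness_intersect_segments : (Int × Int) × (List (Int × Int)) := ((0, 5), [(1, 2)])

def Spec_intersect_segments (segment : Int × Int) (rule_segments : List (Int × Int)) (out : List (Int × Int)) : Prop := out = intersect_segments_alt segment rule_segments
instance (segment : Int × Int) (rule_segments : List (Int × Int)) (out : List (Int × Int)) : Decidable (Spec_intersect_segments segment rule_segments out) := by unfold Spec_intersect_segments; infer_instance

-- ===== CLAIM (what is proved, stated in full; the proofs are below) =====
def Claim_equal_intersect_segments : Prop := ∀ (segment : Int × Int) (rule_segments : List (Int × Int)), Dom_intersect_segments segment rule_segments → Pre_intersect_segments segment rule_segments → Spec_intersect_segments segment rule_segments (intersect_segments segment rule_segments)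

-- ===== LEMMAS AND PROOFS =====

-- the consecutive-pieces chain over a boundary tail
def pvChain : Int → List Int → List (Int × Int)
  | _, [] => []
  | cur, p :: rest => (cur, p - cur) :: pvChain p rest

-- insertion of a cut point into a strictly increasing boundary tail (only strictly between cur and the last bound)
def insIn : Int → List Int → Int → List Int
  | _, [], _ => []
  | cur, b :: bs, p => if cur < p ∧ p < b then p :: b :: bs else b :: insIn b bs p

theorem loopA_eq_chain (pts : List Int) (cur e : Int) (acc : List (Int × Int))
    (h : pts.Pairwise (· < ·)) :
    pvLoopA pts cur e acc = acc ++ pvChain cur (pts.filter (fun p => decide (cur < p) && decide (p ≤ e))) := by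
  induction pts generalizing cur acc with
  | nil => simp [pvLoopA, pvChain]
  | cons p rest ih =>
    have hpr : ∀ q ∈ rest, p < q := (List.pairwise_cons.mp h).1
    have hrest := (List.pairwise_cons.mp h).2
    by_cases hbe : p > e
    · have hnil : rest.filter (fun q => decide (cur < q) && decide (q ≤ e)) = [] := by
        apply List.filter_eq_nil_iff.mpr
        intro q hq
        have := hpr q hq
        simp only [Bool.and_eq_true, decide_eq_true_eq]
        omega
      simp only [pvLoopA, if_pos hbe, List.filter_cons]
      have : (decide (cur < p) && decide (p ≤ e)) = false := by
        simp only [Bool.and_eq_false_iff, decide_eq_false_iff_not]; right; omega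
      rw [this]
      simp only [Bool.false_eq_true, if_false, hnil, pvChain, List.append_nil]
    · have hpe : p ≤ e := by omega
      by_cases hcp : cur < p
      · have hcond : p > cur ∧ p ≤ e := ⟨hcp, hpe⟩
        simp only [pvLoopA, if_neg hbe, if_pos hcond]
        rw [ih p (acc ++ [(cur, p - cur)]) hrest]
        have hfc : rest.filter (fun q => decide (cur < q) && decide (q ≤ e))
            = rest.filter (fun q => decide (p < q) && decide (q ≤ e)) := by
          apply List.filter_congr
          intro q hq
          have hpq := hpr q hq
          have hcq : cur < q := by omega
          simp [hpq, hcq]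
        simp only [List.filter_cons]
        have : (decide (cur < p) && decide (p ≤ e)) = true := by
          simp only [Bool.and_eq_true, decide_eq_true_eq]; exact ⟨hcp, hpe⟩
        rw [this, hfc]
        simp [pvChain]
      · have hcond : ¬ (p > cur ∧ p ≤ e) := by intro h'; exact hcp h'.1
        simp only [pvLoopA, if_neg hbe, if_neg hcond]
        rw [ih cur acc hrest]
        simp only [List.filter_cons]
        have : (decide (cur < p) && decide (p ≤ e)) = false := by
          simp only [Bool.and_eq_false_iff, decide_eq_false_iff_not]; left; exact hcp
        rw [this]
        simp

theorem eq_of_pairwise_lt_of_mem_iff (l₁ l₂ : List Int)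
    (h₁ : l₁.Pairwise (· < ·)) (h₂ : l₂.Pairwise (· < ·))
    (hm : ∀ x, x ∈ l₁ ↔ x ∈ l₂) : l₁ = l₂ := by
  have n₁ : l₁.Nodup := h₁.imp (fun h => ne_of_lt h)
  have n₂ : l₂.Nodup := h₂.imp (fun h => ne_of_lt h)
  have hperm : l₁.Perm l₂ := (List.perm_ext_iff_of_nodup n₁ n₂).mpr hm
  exact hperm.eq_of_pairwise (fun a b _ _ h h' => absurd h' (not_lt.mpr h.le)) h₁ h₂

theorem foldl_pts (rules : List (Int × Int)) (init : List Int) :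
    rules.foldl (fun acc r => (acc ++ [r.1]) ++ [r.1 + r.2]) init
      = init ++ rules.flatMap (fun r => [r.1, r.1 + r.2]) := by
  induction rules generalizing init with
  | nil => simp
  | cons r rs ih => simp [List.append_assoc, List.flatMap]

theorem pvSplit_cons (s l : Int) (t : List (Int × Int)) (p : Int) :
    pvSplit ((s, l) :: t) p
      = (if s < p ∧ p < s + l then [(s, p - s), (p, s + l - p)] else [(s, l)]) ++ pvSplit t p := by
  simp [pvSplit]

-- splitting at a point that is at or before the first boundary does nothing
theorem pvSplit_noop (b : Int) (rest : List Int) (p : Int)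
    (h : List.Pairwise (· < ·) (b :: rest)) (hp : p ≤ b) :
    pvSplit (pvChain b rest) p = pvChain b rest := by
  induction rest generalizing b with
  | nil => simp [pvChain, pvSplit]
  | cons c r ih =>
    have hbc : b < c := (List.pairwise_cons.mp h).1 c (by simp)
    have htl : List.Pairwise (· < ·) (c :: r) := (List.pairwise_cons.mp h).2
    have hcond : ¬ (b < p ∧ p < b + (c - b)) := by omega
    rw [pvChain, pvSplit_cons, if_neg hcond, ih c htl (by omega)]
    simp

-- splitting a chain at p inserts p into its boundary tail
theorem pvSplit_chain (bs : List Int) (cur p : Int)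
    (h : List.Pairwise (· < ·) (cur :: bs)) :
    pvSplit (pvChain cur bs) p = pvChain cur (insIn cur bs p) := by
  induction bs generalizing cur with
  | nil => simp [pvChain, pvSplit, insIn]
  | cons b rest ih =>
    have hcb : cur < b := (List.pairwise_cons.mp h).1 b (by simp)
    have htl : List.Pairwise (· < ·) (b :: rest) := (List.pairwise_cons.mp h).2
    have hb : cur + (b - cur) = b := by ring
    by_cases hc : cur < p ∧ p < b
    · have hcond : cur < p ∧ p < cur + (b - cur) := by omega
      rw [pvChain, pvSplit_cons, if_pos hcond, pvSplit_noop b rest p htl (by omega),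
          insIn, if_pos hc]
      simp only [pvChain, List.cons_append, List.nil_append]
      rw [hb]
    · have hcond : ¬ (cur < p ∧ p < cur + (b - cur)) := by omega
      rw [pvChain, pvSplit_cons, if_neg hcond, ih b htl, insIn, if_neg hc]
      simp [pvChain]

theorem mem_insIn (bs : List Int) (cur p x : Int)
    (h : List.Pairwise (· < ·) (cur :: bs)) :
    x ∈ insIn cur bs p ↔ x ∈ bs ∨ (x = p ∧ cur < p ∧ ∃ b ∈ bs, p < b) := by
  induction bs generalizing cur with
  | nil => simp [insIn]
  | cons b rest ih =>
    have hcb : cur < b := (List.pairwise_cons.mp h).1 b (by simp)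
    have htl : List.Pairwise (· < ·) (b :: rest) := (List.pairwise_cons.mp h).2
    by_cases hc : cur < p ∧ p < b
    · simp only [insIn, if_pos hc, List.mem_cons]
      constructor
      · rintro (rfl | hx)
        · exact Or.inr ⟨rfl, hc.1, b, by simp, hc.2⟩
        · exact Or.inl hx
      · rintro (hx | ⟨rfl, _, _⟩)
        · exact Or.inr hx
        · exact Or.inl rfl
    · simp only [insIn, if_neg hc, List.mem_cons]
      rw [ih b htl]
      constructor
      · rintro (rfl | hx | ⟨rfl, hbp, c, hc', hpc⟩)
        · exact Or.inl (Or.inl rfl)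
        · exact Or.inl (Or.inr hx)
        · exact Or.inr ⟨rfl, by omega, c, Or.inr hc', hpc⟩
      · rintro ((rfl | hx) | ⟨hxp, hcp, c, hc', hpc⟩)
        · exact Or.inl rfl
        · exact Or.inr (Or.inl hx)
        · rcases hc' with rfl | hcr
          · exact absurd ⟨hcp, hpc⟩ hc
          · by_cases hbp : b < p
            · exact Or.inr (Or.inr ⟨hxp, hbp, c, hcr, hpc⟩)
            · have hxb : x = b := by omega
              exact Or.inl hxb

theorem insIn_pairwise (bs : List Int) (cur p : Int)
    (h : List.Pairwise (· < ·) (cur :: bs)) :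
    List.Pairwise (· < ·) (cur :: insIn cur bs p) := by
  induction bs generalizing cur with
  | nil => simpa [insIn] using h
  | cons b rest ih =>
    have hall : ∀ y ∈ b :: rest, cur < y := (List.pairwise_cons.mp h).1
    have hcb : cur < b := hall b (by simp)
    have htl : List.Pairwise (· < ·) (b :: rest) := (List.pairwise_cons.mp h).2
    have hallb : ∀ y ∈ rest, b < y := (List.pairwise_cons.mp htl).1
    by_cases hc : cur < p ∧ p < b
    · simp only [insIn, if_pos hc]
      refine List.pairwise_cons.mpr ⟨?_, List.pairwise_cons.mpr ⟨?_, htl⟩⟩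
      · intro y hy
        rcases List.mem_cons.mp hy with rfl | hy'
        · exact hc.1
        · exact hall y hy'
      · intro y hy
        rcases List.mem_cons.mp hy with rfl | hy'
        · exact hc.2
        · have := hallb y hy'; omega
    · simp only [insIn, if_neg hc]
      refine List.pairwise_cons.mpr ⟨?_, ih b htl⟩
      intro y hy
      rcases List.mem_cons.mp hy with rfl | hy'
      · exact hcb
      · rcases (mem_insIn rest b p y htl).mp hy' with hy'' | ⟨rfl, hbp, _⟩
        · exact hall y (by simp [hy''])
        · omega

-- B's fold over rules, seen on boundary tails
theorem foldB (rules : List (Int × Int)) (start : Int) (bs : List Int)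
    (h : List.Pairwise (· < ·) (start :: bs)) :
    rules.foldl (fun pcs r => pvSplit (pvSplit pcs r.1) (r.1 + r.2)) (pvChain start bs)
      = pvChain start (rules.foldl (fun b r => insIn start (insIn start b r.1) (r.1 + r.2)) bs) := by
  induction rules generalizing bs with
  | nil => simp
  | cons r rs ih =>
    simp only [List.foldl_cons]
    rw [pvSplit_chain bs start r.1 h,
        pvSplit_chain _ start (r.1 + r.2) (insIn_pairwise bs start r.1 h),
        ih _ (insIn_pairwise _ start (r.1 + r.2) (insIn_pairwise bs start r.1 h))]

theorem foldl_pairs (start : Int) (rules : List (Int × Int)) (bs : List Int) :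
    rules.foldl (fun b r => insIn start (insIn start b r.1) (r.1 + r.2)) bs
      = (rules.flatMap (fun r => [r.1, r.1 + r.2])).foldl (fun b p => insIn start b p) bs := by
  induction rules generalizing bs with
  | nil => simp
  | cons r rs ih => simp [List.flatMap_cons, ih]

theorem foldIns_char (start e : Int) (pts : List Int) (bs : List Int)
    (h1 : List.Pairwise (· < ·) (start :: bs)) (h2 : e ∈ bs) (h3 : ∀ x ∈ bs, x ≤ e) :
    List.Pairwise (· < ·) (start :: pts.foldl (fun b p => insIn start b p) bs)
    ∧ e ∈ pts.foldl (fun b p => insIn start b p) bs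
    ∧ (∀ x ∈ pts.foldl (fun b p => insIn start b p) bs, x ≤ e)
    ∧ (∀ x, x ∈ pts.foldl (fun b p => insIn start b p) bs ↔ x ∈ bs ∨ (x ∈ pts ∧ start < x ∧ x < e)) := by
  induction pts generalizing bs with
  | nil => exact ⟨h1, h2, h3, by simp⟩
  | cons p rest ih =>
    simp only [List.foldl_cons]
    have h1' := insIn_pairwise bs start p h1
    have hmem : ∀ x, x ∈ insIn start bs p ↔ x ∈ bs ∨ (x = p ∧ start < p ∧ p < e) := by
      intro x
      rw [mem_insIn bs start p x h1]
      constructor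
      · rintro (hx | ⟨rfl, hsp, c, hc, hpc⟩)
        · exact Or.inl hx
        · exact Or.inr ⟨rfl, hsp, lt_of_lt_of_le hpc (h3 c hc)⟩
      · rintro (hx | ⟨rfl, hsp, hpe⟩)
        · exact Or.inl hx
        · exact Or.inr ⟨rfl, hsp, e, h2, hpe⟩
    have h2' : e ∈ insIn start bs p := (hmem e).mpr (Or.inl h2)
    have h3' : ∀ x ∈ insIn start bs p, x ≤ e := by
      intro x hx
      rcases (hmem x).mp hx with hx | ⟨rfl, _, hpe⟩
      · exact h3 x hx
      · omega
    obtain ⟨c1, c2, c3, c4⟩ := ih (insIn start bs p) h1' h2' h3'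
    refine ⟨c1, c2, c3, ?_⟩
    intro x
    rw [c4 x, hmem x]
    simp only [List.mem_cons]
    constructor
    · rintro ((hx | ⟨rfl, hs, he⟩) | ⟨hx, hs, he⟩)
      · exact Or.inl hx
      · exact Or.inr ⟨Or.inl rfl, hs, he⟩
      · exact Or.inr ⟨Or.inr hx, hs, he⟩
    · rintro (hx | ⟨rfl | hx, hs, he⟩)
      · exact Or.inl (Or.inl hx)
      · exact Or.inl (Or.inr ⟨rfl, hs, he⟩)
      · exact Or.inr ⟨hx, hs, he⟩

theorem fold_nil (rules : List (Int × Int)) :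
    rules.foldl (fun pcs r => pvSplit (pvSplit pcs r.1) (r.1 + r.2)) [] = [] := by
  induction rules with
  | nil => rfl
  | cons r rs ih => simpa [pvSplit] using ih

-- ===== VERDICT (by name: the statement is the Claim_ definition above) =====
theorem intersect_segments_spec : Claim_equal_intersect_segments := by
  intro segment rule_segments _hdom hpre
  unfold Spec_intersect_segments intersect_segments intersect_segments_alt
  set start := segment.1 with hstart
  set len := segment.2 with hlen
  set e := start + len with he
  have h0 : (0:Int) ≤ len := hpre
  set flat := rule_segments.flatMap (fun r => [r.1, r.1 + r.2]) with hflat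
  rw [foldl_pts]
  simp only [List.nil_append]
  set P := PySem.List.sorted (PySem.Set.ofList ((flat ++ [start]) ++ [e])) (fun x => x) false with hP
  have hPp : P.Pairwise (· < ·) := by rw [hP]; exact PySem.List.sorted_ofList_pairwise_lt _
  have hmemP : ∀ x, x ∈ P ↔ (x ∈ flat ∨ x = start ∨ x = e) := by
    intro x
    rw [hP, PySem.List.mem_sorted, PySem.Set.mem_ofList]
    simp
  rw [loopA_eq_chain _ _ _ _ hPp, List.nil_append]
  by_cases hpos : len > 0
  · rw [if_pos hpos]
    have hse : start < e := by omega
    have hpw0 : List.Pairwise (· < ·) (start :: [e]) := by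
      simp [List.pairwise_cons, hse]
    have hpiece : [(start, len)] = pvChain start [e] := by
      simp [pvChain]; omega
    rw [hpiece, foldB rule_segments start [e] hpw0, foldl_pairs, ← hflat]
    obtain ⟨c1, _, _, c4⟩ := foldIns_char start e flat [e] hpw0 (by simp) (by simp)
    set F := flat.foldl (fun b p => insIn start b p) [e] with hF
    have hFp : F.Pairwise (· < ·) := (List.pairwise_cons.mp c1).2
    have hfe : P.filter (fun p => decide (start < p) && decide (p ≤ e)) = F := by
      apply eq_of_pairwise_lt_of_mem_iff
      · exact hPp.filter _
      · exact hFp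
      · intro x
        rw [List.mem_filter, hmemP x, c4 x]
        simp only [Bool.and_eq_true, decide_eq_true_eq, List.mem_singleton]
        constructor
        · rintro ⟨hsrc, hlt, hle⟩
          by_cases hxe : x = e
          · exact Or.inl hxe
          · rcases hsrc with h | h | h
            · exact Or.inr ⟨h, hlt, lt_of_le_of_ne hle hxe⟩
            · omega
            · exact absurd h hxe
        · rintro (rfl | ⟨hf, h1', h2'⟩)
          · exact ⟨Or.inr (Or.inr rfl), hse, le_refl _⟩
          · exact ⟨Or.inl hf, h1', le_of_lt h2'⟩
    rw [hfe]
  · have hlen0 : len = 0 := by omega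
    rw [if_neg hpos]
    have hfe : P.filter (fun p => decide (start < p) && decide (p ≤ e)) = [] := by
      apply List.filter_eq_nil_iff.mpr
      intro q _
      simp only [Bool.and_eq_true, decide_eq_true_eq]
      omega
    rw [hfe, fold_nil]
    simp [pvChain]
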